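-- pv_equiv track=rewrite | github.com/QuHarmonics/Nexus-4-Framework-Recursive-Harmonic-Architecture | Python Code - Raw Dump/Nexus 4 Framework -SHAunfolding-code_8- Qu Harmonics.py | sha_unfold
-- ===== SOURCE A (Python) =====
-- import math
--
-- def sha_unfold(hash_value):
--     # Define constants
--     FINAL_SIZE = 512
--     WORD_SIZE = 64
--     HARMONIC_CONSTANT = 0.35
--
--     # Initialize arrays
--     hash_array = list(bin(int(hash_value, 16))[2:].zfill(FINAL_SIZE))
--
--     # Define harmonic alignment function
--     def harmonic_align(bit1, bit2):
--         # Simplified harmonic alignment logic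
--         return str((int(bit1) + int(bit2)) % 2)
--
--     # Define Kulik Recursive Reflection Formula (KRR)
--     def krr(reflection, harmonic_resonance, force, time):
--         return reflection * math.exp(harmonic_resonance * force * time)
--
--     # Define Kulik Harmonic Resonance Correction (KHRC V2)
--     def khrc_v2(base_resonance, scaling_factor, noise_magnitude):
--         return base_resonance / (1 + scaling_factor * noise_magnitude)
--
--     # Unfold the hash
--     unfolded_hash = []
--     current_index = 0
--     reflection = 1.0
--     harmonic_resonance = HARMONIC_CONSTANT
--
--     while len(unfolded_hash) < FINAL_SIZE:
--         # Perform harmonic alignment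
--         if current_index < len(hash_array) - 1:
--             aligned_bit = harmonic_align(hash_array[current_index], hash_array[current_index + 1])
--             unfolded_hash.append(aligned_bit)
--             current_index += 1
--         else:
--             # Wrap around to the beginning
--             aligned_bit = harmonic_align(hash_array[current_index], hash_array[0])
--             unfolded_hash.append(aligned_bit)
--             current_index = 0
--
--         # Apply Kulik Recursive Reflection Formula (KRR)
--         force = 1.0 - (len(unfolded_hash) / FINAL_SIZE)
--         time = len(unfolded_hash) / FINAL_SIZE
--         reflection = krr(reflection, harmonic_resonance, force, time)
--
--         # Apply Kulik Harmonic Resonance Correction (KHRC V2)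
--         base_resonance = 1.0
--         scaling_factor = 0.1
--         noise_magnitude = reflection % 0.1
--         base_resonance = khrc_v2(base_resonance, scaling_factor, noise_magnitude)
--
--     # Convert unfolded hash to binary string
--     unfolded_hash_str = ''.join(unfolded_hash)
--
--     return unfolded_hash_str
--
-- hash_value = "185f8db32271fe25f561a6fc938b2e264306ec304eda518007d1764826381969"
--
-- unfolded_hash = sha_unfold(hash_value)
-- ===== SOURCE B (Python) =====
-- def sha_unfold(hash_value):
--     # Whole-value integer arithmetic instead of A's per-bit loop: the adjacent-bit
--     # XOR of the zero-filled bit string is one big-int expression n ^ (n << 1),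
--     # windowed to 512 bits; only an exactly-512-bit input wraps its last bit to bit 0.
--     n = int(hash_value, 16)
--     L = max(n.bit_length(), 512)
--     res = ((n ^ (n << 1)) >> (L - 512)) & ((1 << 512) - 1)
--     if L == 512:
--         res ^= (n >> 511) & 1
--     return bin(res)[2:].zfill(512)
-- ===== Notes on version B (the rewrite author's own statement) =====
-- stated objective: faster
-- what changed: Replaces A's per-bit while-loop over a 512-char list (mutable index, wrap-around branch, per-bit string/int conversions, plus a dead krr/khrc floating-point recurrence that never affects the output) by whole-value integer arithmetic: the adjacent-bit XOR of the entire bit string is computed at once as n ^ (n << 1), shifted and masked to the 512-bit window, with one final bit-0 fix when the input is exactly 512 bits; the per-bit interpreted loop and float recurrence disappear into a few big-int machine operations.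
import Mathlib
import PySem

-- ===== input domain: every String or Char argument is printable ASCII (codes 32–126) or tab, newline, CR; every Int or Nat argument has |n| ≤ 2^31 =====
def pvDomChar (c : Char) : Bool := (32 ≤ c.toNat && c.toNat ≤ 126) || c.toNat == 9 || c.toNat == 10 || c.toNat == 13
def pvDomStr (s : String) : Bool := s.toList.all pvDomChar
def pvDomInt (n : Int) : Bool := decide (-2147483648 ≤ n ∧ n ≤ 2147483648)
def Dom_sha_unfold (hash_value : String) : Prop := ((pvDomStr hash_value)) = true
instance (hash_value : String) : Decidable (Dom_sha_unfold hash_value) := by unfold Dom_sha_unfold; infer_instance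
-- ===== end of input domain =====

-- B replaces A's per-bit loop over a 512-char list (and A's dead krr/khrc float recurrence,
-- which never affects the output and cannot raise) by whole-value integer arithmetic
-- (n ^ (n << 1), shift, mask, one wrap fix); equivalence is proved on inputs that parse as
-- a nonnegative hex integer (elsewhere A raises ValueError).

-- ===== PORT A =====
-- A starts with bin(int(hash_value, 16))[2:].zfill(512).
def pvBits (hash_value : String) : List Char :=
  PySem.Chars.zfill
    (PySem.List.slice (PySem.Int.pyBin ((PySem.Int.ofStrBase? hash_value 16).getD 0)).toList (some 2) none)
    512

-- harmonic_align: Python's one-character string str((int(bit1)+int(bit2)) % 2) kept as a Char.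
def pvHarmonicAlign (b1 b2 : Char) : Char :=
  (PySem.Int.toStr (PySem.Int.mod
    ((PySem.Int.ofStr? (String.ofList [b1])).getD 0 + (PySem.Int.ofStr? (String.ofList [b2])).getD 0) 2)).toList.headD '0'

-- A's while-loop: each iteration appends exactly one bit, so 512 - len(unfolded_hash)
-- iterations remain; that count is the structural fuel.  The krr/khrc reflection floats
-- are written but never read (and cannot raise), so they carry no state here.
def pvUnfoldLoop (arr : List Char) (acc : List Char) (i : Nat) : Nat → List Char
  | 0 => acc
  | r + 1 =>
    if (i : Int) < (arr.length : Int) - 1 then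
      pvUnfoldLoop arr (acc ++ [pvHarmonicAlign (PySem.List.pyGetD arr (i : Int) '0') (PySem.List.pyGetD arr ((i : Int) + 1) '0')]) (i + 1) r
    else
      pvUnfoldLoop arr (acc ++ [pvHarmonicAlign (PySem.List.pyGetD arr (i : Int) '0') (PySem.List.pyGetD arr 0 '0')]) 0 r

def sha_unfold (hash_value : String) : String :=
  String.ofList (pvUnfoldLoop (pvBits hash_value) [] 0 512)

-- ===== PORT B =====
-- Source B line by line: n = int(hash_value,16); L = max(n.bit_length(), 512);
-- res = ((n ^ (n << 1)) >> (L - 512)) & ((1 << 512) - 1); if L == 512: res ^= (n >> 511) & 1;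
-- return bin(res)[2:].zfill(512).
def sha_unfold_alt (hash_value : String) : String :=
  let n : Int := (PySem.Int.ofStrBase? hash_value 16).getD 0
  let L : Nat := max (PySem.Int.bitLength n) 512
  let res : Int := PySem.Int.band (PySem.Int.bxor n (n <<< (1 : Nat)) >>> (L - 512)) (((1 : Int) <<< (512 : Nat)) - 1)
  let res2 : Int := if L = 512 then PySem.Int.bxor res (PySem.Int.band (n >>> (511 : Nat)) 1) else res
  String.ofList (PySem.Chars.zfill (PySem.List.slice (PySem.Int.pyBin res2).toList (some 2) none) 512)

-- ===== PRECONDITION & SPEC =====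
-- Pre_: int(hash_value, 16) succeeds and is nonnegative.  Otherwise A raises ValueError
-- (either in int() itself, or later inside harmonic_align on the letter that bin() puts
-- after the sign of a negative value).
def Pre_sha_unfold (hash_value : String) : Prop :=
  0 ≤ (PySem.Int.ofStrBase? hash_value 16).getD (-1)
instance (hash_value : String) : Decidable (Pre_sha_unfold hash_value) := by unfold Pre_sha_unfold; infer_instance
def pvWitness_sha_unfold : String := "1a"

def Spec_sha_unfold (hash_value : String) (out : String) : Prop := out = sha_unfold_alt hash_value
instance (hash_value : String) (out : String) : Decidable (Spec_sha_unfold hash_value out) := by unfold Spec_sha_unfold; infer_instance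

-- ===== CLAIM (what is proved, stated in full; the proofs are below) =====
def Claim_equal_sha_unfold : Prop := ∀ (hash_value : String), Dom_sha_unfold hash_value → Pre_sha_unfold hash_value → Spec_sha_unfold hash_value (sha_unfold hash_value)

-- ===== LEMMAS AND PROOFS =====

-- Structural (fuel-free) form of Nat.toDigits 2: MSB-first binary digits.
def pvDigitsRec (n : Nat) : List Char :=
  if n < 2 then [Nat.digitChar n]
  else pvDigitsRec (n / 2) ++ [Nat.digitChar (n % 2)]
decreasing_by omega

theorem pv_toDigitsCore_eq : ∀ (f n : Nat) (acc : List Char), n < f →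
    Nat.toDigitsCore 2 f n acc = pvDigitsRec n ++ acc := by
  intro f
  induction f with
  | zero => intro n acc h; omega
  | succ f ih =>
    intro n acc h
    rw [Nat.toDigitsCore]
    by_cases h2 : n < 2
    · rw [if_pos (by omega)]
      rw [pvDigitsRec, if_pos h2, Nat.mod_eq_of_lt h2]
      rfl
    · rw [if_neg (by omega)]
      rw [ih (n / 2) _ (by omega)]
      conv_rhs => rw [pvDigitsRec]
      rw [if_neg h2]
      simp

theorem pv_toDigits_eq (n : Nat) : Nat.toDigits 2 n = pvDigitsRec n := by
  rw [Nat.toDigits, pv_toDigitsCore_eq (n + 1) n [] (by omega), List.append_nil]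

theorem pv_dr_ne_nil (n : Nat) : pvDigitsRec n ≠ [] := by
  rw [pvDigitsRec]
  split <;> simp

theorem pv_dr_binary (n : Nat) : ∀ c ∈ pvDigitsRec n, c = '0' ∨ c = '1' := by
  induction n using pvDigitsRec.induct with
  | case1 n h =>
    rw [pvDigitsRec, if_pos h]
    interval_cases n <;> simp [Nat.digitChar]
  | case2 n h ih =>
    rw [pvDigitsRec, if_neg h]
    intro c hc
    rcases List.mem_append.mp hc with hc | hc
    · exact ih c hc
    · have : c = (n % 2).digitChar := by simpa using hc
      subst this
      rcases Nat.mod_two_eq_zero_or_one n with h2 | h2 <;> rw [h2] <;> simp [Nat.digitChar]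

theorem pv_dr_length (n : Nat) : n ≠ 0 →
    (pvDigitsRec n).length = PySem.Int.bitLength (n : Int) := by
  induction n using pvDigitsRec.induct with
  | case1 n h2 =>
    intro h
    have : n = 1 := by omega
    subst this
    rw [pvDigitsRec]
    simp only [if_pos (by omega : (1:Nat) < 2), List.length_cons, List.length_nil]
    decide
  | case2 n h2 ih =>
    intro h
    rw [pvDigitsRec, if_neg h2]
    rw [List.length_append, List.length_cons, List.length_nil]
    rw [ih (by omega)]
    conv_rhs => rw [PySem.Int.bitLength_natCast (show 0 < n by omega)]

theorem pv_dr_lt (n : Nat) : n < 2 ^ (pvDigitsRec n).length := by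
  induction n using pvDigitsRec.induct with
  | case1 n h =>
    rw [pvDigitsRec, if_pos h]
    simpa using h
  | case2 n h ih =>
    rw [pvDigitsRec, if_neg h]
    rw [List.length_append, List.length_cons, List.length_nil, pow_succ]
    omega

theorem pv_dr_getD (n : Nat) : ∀ j, j < (pvDigitsRec n).length →
    (pvDigitsRec n).getD j '0' = if n.testBit ((pvDigitsRec n).length - 1 - j) then '1' else '0' := by
  induction n using pvDigitsRec.induct with
  | case1 n h =>
    intro j hj
    rw [pvDigitsRec, if_pos h] at hj ⊢
    have hj0 : j = 0 := by simpa using hj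
    subst hj0
    interval_cases n <;> decide
  | case2 n h ih =>
    intro j hj
    rw [pvDigitsRec, if_neg h] at hj ⊢
    rw [List.length_append, List.length_cons, List.length_nil] at hj ⊢
    set l := (pvDigitsRec (n / 2)).length with hl
    by_cases hjl : j < l
    · rw [List.getD_append _ _ _ _ hjl]
      rw [ih j hjl]
      have e : l + 1 - 1 - j = (l - 1 - j) + 1 := by omega
      rw [e, Nat.testBit_succ]
    · have hj1 : j = l := by omega
      subst hj1
      have e : l + 1 - 1 - l = 0 := by omega
      rw [e]
      rw [List.getD_append_right _ _ _ l (le_refl l), Nat.sub_self]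
      rw [Nat.testBit_zero]
      rcases Nat.mod_two_eq_zero_or_one n with h2 | h2 <;>
        simp [h2, Nat.digitChar]

-- zfill on a string whose first char is not a sign just left-pads with zeros.
theorem pv_zfill_eq (c : Char) (cs : List Char) (w : Int) (hp : c ≠ '+') (hm : c ≠ '-') :
    PySem.Chars.zfill (c :: cs) w = List.replicate (w.toNat - (c :: cs).length) '0' ++ (c :: cs) := by
  rw [PySem.Chars.zfill]
  split
  next hw =>
    have : w.toNat - (c :: cs).length = 0 := by
      simp only [List.length_cons] at hw ⊢
      omega
    rw [this]
    simp
  next hw =>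
    rw [if_neg (by tauto)]

-- Character j of the L-wide zero-filled binary string of m is bit L-1-j of m.
theorem pv_pad_getD (m L j : Nat) (hlen : (pvDigitsRec m).length ≤ L) (hj : j < L) :
    (List.replicate (L - (pvDigitsRec m).length) '0' ++ pvDigitsRec m).getD j '0'
      = if m.testBit (L - 1 - j) then '1' else '0' := by
  set l := (pvDigitsRec m).length with hl
  by_cases hjp : j < L - l
  · rw [List.getD_append _ _ _ _ (by simpa using hjp)]
    have hbit : m.testBit (L - 1 - j) = false := by
      apply Nat.testBit_lt_two_pow
      calc m < 2 ^ l := pv_dr_lt m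
        _ ≤ 2 ^ (L - 1 - j) := Nat.pow_le_pow_right (by omega) (by omega)
    rw [hbit]
    simp
  · rw [List.getD_append_right _ _ _ j (by simp only [List.length_replicate]; omega)]
    rw [List.length_replicate]
    rw [pv_dr_getD m (j - (L - l)) (by omega)]
    have e : l - 1 - (j - (L - l)) = L - 1 - j := by omega
    rw [← hl, e]

-- bin(x)[2:].zfill(512) for 0 ≤ x, as padded pvDigitsRec.
theorem pv_bin_zfill (x : Int) (hx : 0 ≤ x) :
    PySem.Chars.zfill (PySem.List.slice (PySem.Int.pyBin x).toList (some 2) none) 512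
      = List.replicate (512 - (pvDigitsRec x.toNat).length) '0' ++ pvDigitsRec x.toNat := by
  rw [PySem.Int.toList_pyBin, PySem.Int.toBinChars0b, if_neg (by omega)]
  rw [PySem.List.slice_from _ (by norm_num)]
  have e2 : (2 : Int).toNat = 2 := rfl
  rw [e2]
  simp only [List.drop_succ_cons, List.drop_zero]
  rw [pv_toDigits_eq]
  cases hdr : pvDigitsRec x.toNat with
  | nil => exact absurd hdr (pv_dr_ne_nil x.toNat)
  | cons c rest =>
    have hc : c = '0' ∨ c = '1' := pv_dr_binary x.toNat c (by rw [hdr]; exact List.mem_cons_self)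
    rw [pv_zfill_eq c rest 512 (by rcases hc with h | h <;> simp [h]) (by rcases hc with h | h <;> simp [h])]
    congr 1

-- A's loop when no wrap happens within the remaining fuel.
theorem pv_loop_no_wrap (arr : List Char) :
    ∀ (r i : Nat) (acc : List Char), i + r + 1 ≤ arr.length →
    pvUnfoldLoop arr acc i r
      = acc ++ (List.range r).map (fun k => pvHarmonicAlign (arr.getD (i + k) '0') (arr.getD (i + k + 1) '0')) := by
  intro r
  induction r with
  | zero => intro i acc _; simp [pvUnfoldLoop]
  | succ r ih =>
    intro i acc h
    rw [pvUnfoldLoop]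
    rw [if_pos (by omega)]
    rw [ih (i + 1) _ (by omega)]
    rw [List.range_succ_eq_map, List.map_cons, List.map_map, List.append_assoc,
      List.singleton_append]
    have h1 : ((i : Int) + 1) = (((i + 1 : Nat) : Int)) := by push_cast; ring
    rw [h1]
    simp only [PySem.List.pyGetD_natCast]
    have hhead : pvHarmonicAlign (arr.getD i '0') (arr.getD (i + 1) '0')
        = pvHarmonicAlign (arr.getD (i + 0) '0') (arr.getD (i + 0 + 1) '0') := by norm_num
    have htail : (List.range r).map (fun k => pvHarmonicAlign (arr.getD (i + 1 + k) '0') (arr.getD (i + 1 + k + 1) '0'))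
        = (List.range r).map ((fun k => pvHarmonicAlign (arr.getD (i + k) '0') (arr.getD (i + k + 1) '0')) ∘ Nat.succ) := by
      apply List.map_congr_left
      intro k _
      simp only [Function.comp_apply, Nat.succ_eq_add_one]
      rw [show i + 1 + k = i + (k + 1) from by omega]
    rw [hhead, htail]

-- A's loop when the fuel reaches exactly the end of the array: the last step wraps.
theorem pv_loop_wrap (arr : List Char) (h0 : 0 < arr.length) :
    ∀ (r i : Nat) (acc : List Char), i + r = arr.length →
    pvUnfoldLoop arr acc i r
      = acc ++ (List.range r).map (fun k =>
          if i + k + 1 = arr.length then pvHarmonicAlign (arr.getD (arr.length - 1) '0') (arr.getD 0 '0')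
          else pvHarmonicAlign (arr.getD (i + k) '0') (arr.getD (i + k + 1) '0')) := by
  intro r
  induction r with
  | zero => intro i acc _; simp [pvUnfoldLoop]
  | succ r ih =>
    intro i acc h
    rw [pvUnfoldLoop]
    by_cases hr : r = 0
    · subst hr
      have hi : i = arr.length - 1 := by omega
      rw [if_neg (by omega)]
      rw [pvUnfoldLoop]
      simp only [Nat.zero_add, List.range_one, List.map_cons, List.map_nil,
        PySem.List.pyGetD_natCast, PySem.List.pyGetD_zero]
      rw [if_pos (by omega), hi]
    · rw [if_pos (by omega)]
      rw [ih (i + 1) _ (by omega)]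
      rw [List.range_succ_eq_map, List.map_cons, List.map_map, List.append_assoc,
        List.singleton_append]
      have h1 : ((i : Int) + 1) = (((i + 1 : Nat) : Int)) := by push_cast; ring
      rw [h1]
      simp only [PySem.List.pyGetD_natCast]
      rw [if_neg (by omega)]
      have hhead : pvHarmonicAlign (arr.getD i '0') (arr.getD (i + 1) '0')
          = pvHarmonicAlign (arr.getD (i + 0) '0') (arr.getD (i + 0 + 1) '0') := by norm_num
      have htail : (List.range r).map (fun k =>
            if i + 1 + k + 1 = arr.length then pvHarmonicAlign (arr.getD (arr.length - 1) '0') (arr.getD 0 '0')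
            else pvHarmonicAlign (arr.getD (i + 1 + k) '0') (arr.getD (i + 1 + k + 1) '0'))
          = (List.range r).map ((fun k =>
            if i + k + 1 = arr.length then pvHarmonicAlign (arr.getD (arr.length - 1) '0') (arr.getD 0 '0')
            else pvHarmonicAlign (arr.getD (i + k) '0') (arr.getD (i + k + 1) '0')) ∘ Nat.succ) := by
        apply List.map_congr_left
        intro k _
        simp only [Function.comp_apply, Nat.succ_eq_add_one]
        by_cases hk : i + 1 + k + 1 = arr.length
        · rw [if_pos hk, if_pos (by omega)]
        · rw [if_neg hk, if_neg (by omega)]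
          rw [show i + 1 + k = i + (k + 1) from by omega]
      rw [hhead, htail]

theorem pv_align_if (a b : Bool) :
    pvHarmonicAlign (if a then '1' else '0') (if b then '1' else '0')
      = if (a ^^ b) then '1' else '0' := by
  cases a <;> cases b <;> decide

-- resN2.testBit facts, no-wrap window (L ≥ 513).
theorem pv_res_bit_nowrap (m L k : Nat) (hL : 513 ≤ L) (hk : k < 512) :
    (((m ^^^ (m <<< 1)) >>> (L - 512)) &&& (2 ^ 512 - 1)).testBit (512 - 1 - k)
      = (m.testBit (L - 1 - k) ^^ m.testBit (L - 1 - (k + 1))) := by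
  simp only [Nat.testBit_and, Nat.testBit_shiftRight, Nat.testBit_xor, Nat.testBit_shiftLeft,
    Nat.testBit_two_pow_sub_one]
  have e1 : L - 512 + (512 - 1 - k) = L - 1 - k := by omega
  rw [e1]
  have e2 : L - 1 - k - 1 = L - 1 - (k + 1) := by omega
  rw [e2]
  simp [show 512 - 1 - k < 512 by omega, show L - 1 - k ≥ 1 by omega]

-- resN2.testBit facts, wrap case (L = 512), inner positions.
theorem pv_res_bit_wrap_mid (m k : Nat) (hk : k < 511) :
    ((((m ^^^ (m <<< 1)) >>> (512 - 512)) &&& (2 ^ 512 - 1)) ^^^ ((m >>> 511) &&& 1)).testBit (512 - 1 - k)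
      = (m.testBit (512 - 1 - k) ^^ m.testBit (512 - 1 - (k + 1))) := by
  simp only [Nat.testBit_and, Nat.testBit_shiftRight, Nat.testBit_xor, Nat.testBit_shiftLeft,
    Nat.testBit_two_pow_sub_one]
  have h1 : (1 : Nat).testBit (512 - 1 - k) = false :=
    Nat.testBit_lt_two_pow (by
      have : (2:Nat) ^ 1 ≤ 2 ^ (512 - 1 - k) := Nat.pow_le_pow_right (by omega) (by omega)
      omega)
  rw [h1]
  have e0 : 512 - 512 + (512 - 1 - k) = 512 - 1 - k := by omega
  rw [e0]
  have e2 : 512 - 1 - k - 1 = 512 - 1 - (k + 1) := by omega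
  rw [e2]
  simp [show 512 - 1 - k < 512 by omega, show 512 - 1 - k ≥ 1 by omega]

-- resN2.testBit facts, wrap case, last position (bit 0).
theorem pv_res_bit_wrap_last (m : Nat) :
    ((((m ^^^ (m <<< 1)) >>> (512 - 512)) &&& (2 ^ 512 - 1)) ^^^ ((m >>> 511) &&& 1)).testBit (512 - 1 - 511)
      = (m.testBit 0 ^^ m.testBit 511) := by
  simp only [Nat.testBit_and, Nat.testBit_shiftRight, Nat.testBit_xor, Nat.testBit_shiftLeft,
    Nat.testBit_two_pow_sub_one, show (512:Nat) - 1 - 511 = 0 from rfl]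
  simp

-- ===== VERDICT (by name: the statement is the Claim_ definition above) =====
set_option maxRecDepth 8192 in
theorem sha_unfold_spec : Claim_equal_sha_unfold := by
  intro hv _ hpre
  unfold Pre_sha_unfold at hpre
  unfold Spec_sha_unfold sha_unfold sha_unfold_alt pvBits
  cases hP : PySem.Int.ofStrBase? hv 16 with
  | none => rw [hP] at hpre; norm_num at hpre
  | some v =>
    rw [hP] at hpre
    simp only [Option.getD_some] at hpre ⊢
    obtain ⟨m, rfl⟩ : ∃ m : Nat, v = (m : Int) := ⟨v.toNat, (Int.toNat_of_nonneg hpre).symm⟩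
    set l := (pvDigitsRec m).length with hldef
    have hl1 : 1 ≤ l := by
      cases hdr : pvDigitsRec m with
      | nil => exact absurd hdr (pv_dr_ne_nil m)
      | cons a b => rw [hldef, hdr]; simp
    set L := max l 512 with hLdef
    -- the 512-zero-filled bit list of A
    have hbits : PySem.Chars.zfill
        (PySem.List.slice (PySem.Int.pyBin ((m : Nat) : Int)).toList (some 2) none) 512
        = List.replicate (L - l) '0' ++ pvDigitsRec m := by
      rw [pv_bin_zfill _ (Int.natCast_nonneg _), Int.toNat_natCast]
      congr 2
      omega
    have hblen : (List.replicate (L - l) '0' ++ pvDigitsRec m).length = L := by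
      simp only [List.length_append, List.length_replicate, ← hldef]
      omega
    have hget : ∀ j, j < L → (List.replicate (L - l) '0' ++ pvDigitsRec m).getD j '0'
        = if m.testBit (L - 1 - j) then '1' else '0' :=
      fun j hj => pv_pad_getD m L j (by omega) hj
    -- B's max(bit_length, 512) is the same L
    have hLB : max (PySem.Int.bitLength ((m : Nat) : Int)) 512 = L := by
      by_cases hm0 : m = 0
      · subst hm0
        have hl01 : l = 1 := by rw [hldef, pvDigitsRec]; simp
        rw [hLdef, hl01]
        norm_num [PySem.Int.bitLength_zero]
      · rw [hLdef, hldef, pv_dr_length m hm0]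
    -- B's integer result, as a Nat
    set resNat := ((m ^^^ (m <<< 1)) >>> (L - 512)) &&& (2 ^ 512 - 1) with hresdef
    set resN2 := if L = 512 then resNat ^^^ ((m >>> 511) &&& 1) else resNat with hres2def
    have hcast1 : PySem.Int.bxor ((m : Nat) : Int) (((m : Nat) : Int) <<< (1 : Nat))
        = (((m ^^^ (m <<< 1) : Nat)) : Int) := by
      rw [← Int.natCast_shiftLeft, PySem.Int.bxor_natCast]
    have hcastmask : ((1 : Int) <<< (512 : Nat)) - 1 = (((2 ^ 512 - 1 : Nat)) : Int) := by
      rw [show (1 : Int) = ((1 : Nat) : Int) from rfl, ← Int.natCast_shiftLeft]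
      rw [Nat.shiftLeft_eq, one_mul, Int.natCast_sub (Nat.one_le_two_pow)]
    have hcastres : PySem.Int.band
        (PySem.Int.bxor ((m : Nat) : Int) (((m : Nat) : Int) <<< (1 : Nat)) >>> (L - 512)) (((1 : Int) <<< (512 : Nat)) - 1)
        = ((resNat : Nat) : Int) := by
      rw [hcast1, ← Int.natCast_shiftRight, hcastmask, PySem.Int.band_natCast, hresdef]
    have hcastw : PySem.Int.band (((m : Nat) : Int) >>> (511 : Nat)) (1 : Int)
        = ((((m >>> 511) &&& 1 : Nat)) : Int) := by
      rw [show (1 : Int) = ((1 : Nat) : Int) from rfl, ← Int.natCast_shiftRight,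
        PySem.Int.band_natCast]
    -- bound on the result
    have hreslt : resNat < 2 ^ 512 := by
      have h1 : resNat ≤ 2 ^ 512 - 1 := Nat.and_le_right
      have h2 : (0:Nat) < 2 ^ 512 := pow_pos (by omega) 512
      omega
    have hres2lt : resN2 < 2 ^ 512 := by
      rw [hres2def]
      split
      · exact Nat.xor_lt_two_pow hreslt (by
          have : (m >>> 511) &&& 1 ≤ 1 := Nat.and_le_right
          have h2 : (2:Nat) ≤ 2 ^ 512 := by
            calc (2:Nat) = 2 ^ 1 := rfl
              _ ≤ 2 ^ 512 := Nat.pow_le_pow_right (by omega) (by omega)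
          omega)
      · exact hreslt
    have hlen2 : (pvDigitsRec resN2).length ≤ 512 := by
      by_cases h0 : resN2 = 0
      · rw [h0, pvDigitsRec]; simp
      · rw [pv_dr_length _ h0]
        by_contra hgt
        have hle := PySem.Int.two_pow_bitLength_le ((resN2 : Nat) : Int)
          (by exact_mod_cast h0)
        rw [Int.natAbs_natCast] at hle
        have : (2:Nat) ^ 512 ≤ 2 ^ (PySem.Int.bitLength ((resN2 : Nat) : Int) - 1) :=
          Nat.pow_le_pow_right (by omega) (by omega)
        omega
    -- rewrite B's side to the padded digit list of resN2
    rw [hbits, hLB, hcastres, hcastw]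
    have hifcast : (if L = 512 then PySem.Int.bxor ((resNat : Nat) : Int) ((((m >>> 511) &&& 1 : Nat)) : Int)
        else ((resNat : Nat) : Int)) = ((resN2 : Nat) : Int) := by
      rw [hres2def]
      split
      · exact PySem.Int.bxor_natCast _ _
      · rfl
    rw [hifcast, pv_bin_zfill _ (Int.natCast_nonneg _), Int.toNat_natCast]
    have hgetB : ∀ j, j < 512 → (List.replicate (512 - (pvDigitsRec resN2).length) '0'
          ++ pvDigitsRec resN2).getD j '0'
        = if resN2.testBit (512 - 1 - j) then '1' else '0' :=
      fun j hj => pv_pad_getD resN2 512 j hlen2 hj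
    -- split on whether the bit string is longer than 512 (no wrap) or exactly 512 (wrap)
    by_cases hl5 : l ≤ 512
    · -- wrap: bits has exactly 512 chars
      have hL5 : L = 512 := by omega
      rw [pv_loop_wrap (List.replicate (L - l) '0' ++ pvDigitsRec m)
        (by rw [hblen]; omega) 512 0 [] (by rw [hblen]; omega)]
      refine congrArg String.ofList ?_
      apply List.ext_getElem
      · simp only [List.nil_append, List.length_map, List.length_range, List.length_append,
          List.length_replicate]
        omega
      · intro k hk1 hk2
        have hk : k < 512 := by
          simp only [List.nil_append, List.length_map, List.length_range] at hk1; omega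
        simp only [List.nil_append, List.getElem_map, List.getElem_range, Nat.zero_add]
        rw [← List.getD_eq_getElem _ '0' hk2, hgetB k hk]
        rw [hblen, hL5]
        rw [hL5] at hget
        by_cases hk5 : k = 511
        · subst hk5
          rw [if_pos rfl]
          rw [hget (512 - 1) (by omega), hget 0 (by omega), pv_align_if]
          rw [hres2def, if_pos hL5, hresdef, hL5]
          rw [pv_res_bit_wrap_last m]
        · rw [if_neg (by omega)]
          rw [hget k (by omega), hget (k + 1) (by omega), pv_align_if]
          rw [hres2def, if_pos hL5, hresdef, hL5]
          rw [pv_res_bit_wrap_mid m k (by omega)]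
    · -- no wrap: bits is longer than 512 chars
      have hL3 : 513 ≤ L := by omega
      have hLne : L ≠ 512 := by omega
      rw [pv_loop_no_wrap (List.replicate (L - l) '0' ++ pvDigitsRec m) 512 0 []
        (by rw [hblen]; omega)]
      refine congrArg String.ofList ?_
      apply List.ext_getElem
      · simp only [List.nil_append, List.length_map, List.length_range, List.length_append,
          List.length_replicate]
        omega
      · intro k hk1 hk2
        have hk : k < 512 := by
          simp only [List.nil_append, List.length_map, List.length_range] at hk1; omega
        simp only [List.nil_append, List.getElem_map, List.getElem_range, Nat.zero_add]
        rw [← List.getD_eq_getElem _ '0' hk2, hgetB k hk]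
        rw [hget k (by omega), hget (k + 1) (by omega), pv_align_if]
        rw [hres2def, if_neg hLne, hresdef]
        rw [pv_res_bit_nowrap m L k hL3 hk]
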